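-- pv_equiv track=rewrite | github.com/ShaiOren4761/CodeWarrior | Stop gninnipS My sdroW!.py | spin_words_better
-- ===== SOURCE A (Python) =====
-- def spin_words_better(sentence):
--     ret = ''
--     word = ''
--
--     for i, c in enumerate(sentence):
--         if c.isalpha():
--             word += c
--         elif len(word) >= 5:
--             ret += word[::-1] + ' '
--             word = ''
--         else:
--             ret += word + ' '
--             word = ''
--     else:
--         if len(word) >= 5:
--             ret += word[::-1]
--         else:
--             ret += word
--
--     return ret
-- ===== SOURCE B (Python) =====
-- def spin_words_better(sentence):
--     # Run-splitting: repeatedly peel off either a maximal alphabetic run (spun if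
--     # len>=5) or a single non-alpha char (emitted as one space), collecting parts
--     # and joining once at the end.
--     parts = []
--     s = sentence
--     while s:
--         if s[0].isalpha():
--             k = 1
--             while k < len(s) and s[k].isalpha():
--                 k += 1
--             w = s[:k]
--             parts.append(w[::-1] if len(w) >= 5 else w)
--             s = s[k:]
--         else:
--             parts.append(' ')
--             s = s[1:]
--     return ''.join(parts)
-- ===== Notes on version B (the rewrite author's own statement) =====
-- stated objective: alternative
-- what changed: Replaces the single forward scan with a (ret, word) accumulator pair and repeated string concatenation by a run-splitting decomposition that repeatedly peels a maximal alphabetic run (spun if long) or one non-alpha char (one space), collecting parts and joining once.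
import Mathlib
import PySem

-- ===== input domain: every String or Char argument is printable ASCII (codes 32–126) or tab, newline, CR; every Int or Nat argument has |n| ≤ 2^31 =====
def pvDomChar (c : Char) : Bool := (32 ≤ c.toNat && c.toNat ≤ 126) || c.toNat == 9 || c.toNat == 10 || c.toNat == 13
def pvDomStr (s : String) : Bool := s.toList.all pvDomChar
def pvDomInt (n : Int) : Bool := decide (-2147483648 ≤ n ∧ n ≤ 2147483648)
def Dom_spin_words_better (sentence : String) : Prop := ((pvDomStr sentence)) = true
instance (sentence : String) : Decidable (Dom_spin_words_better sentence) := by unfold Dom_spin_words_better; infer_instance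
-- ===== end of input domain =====

-- B replaces A's single accumulator-pair scan by a run-splitting decomposition
-- (peel a maximal alpha run or one delimiter, join the parts once); same return value, no speed claim.

-- ===== PORT A =====
-- forward scan accumulating (ret, word); word[::-1] is .reverse
def spin_words_better (sentence : String) : String :=
  let st := sentence.toList.foldl
    (fun (p : List Char × List Char) c =>
      if PySem.Chars.isalpha c then (p.1, p.2 ++ [c])
      else if 5 ≤ p.2.length then (p.1 ++ p.2.reverse ++ [' '], ([] : List Char))
      else (p.1 ++ p.2 ++ [' '], ([] : List Char)))
    (([] : List Char), ([] : List Char))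
  String.mk (if 5 ≤ st.2.length then st.1 ++ st.2.reverse else st.1 ++ st.2)

-- ===== PORT B =====
-- Source B's while loop peels either the maximal alphabetic prefix (takeWhile, = s[:k])
-- or one delimiter char, recursing on the rest; ''.join(parts) is flatten.
def spinParts : List Char → List (List Char)
  | [] => []
  | c :: cs =>
    if PySem.Chars.isalpha c then
      let w := (c :: cs).takeWhile PySem.Chars.isalpha
      (if 5 ≤ w.length then w.reverse else w) :: spinParts (cs.dropWhile PySem.Chars.isalpha)
    else [' '] :: spinParts cs
termination_by l => l.length
decreasing_by
  all_goals simp only [List.length_cons]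
  · exact Nat.lt_succ_of_le (List.length_dropWhile_le _ _)
  · omega

def spin_words_better_alt (sentence : String) : String :=
  String.mk (spinParts sentence.toList).flatten

-- ===== PRECONDITION & SPEC =====
def Spec_spin_words_better (sentence : String) (out : String) : Prop := out = spin_words_better_alt sentence
instance (sentence : String) (out : String) : Decidable (Spec_spin_words_better sentence out) := by unfold Spec_spin_words_better; infer_instance

-- ===== CLAIM (what is proved, stated in full; the proofs are below) =====
def Claim_equal_spin_words_better : Prop := ∀ (sentence : String), Dom_spin_words_better sentence → Spec_spin_words_better sentence (spin_words_better sentence)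

-- ===== LEMMAS AND PROOFS =====

-- spin of a completed word (forward orientation)
def spinW (w : List Char) : List Char := if 5 ≤ w.length then w.reverse else w

-- the flattened parts, as one recursive function on the character list
def spinRuns (l : List Char) : List Char := (spinParts l).flatten

theorem takeWhile_append_all {w r : List Char} (h : ∀ c ∈ w, PySem.Chars.isalpha c = true) :
    (w ++ r).takeWhile PySem.Chars.isalpha = w ++ r.takeWhile PySem.Chars.isalpha ∧
    (w ++ r).dropWhile PySem.Chars.isalpha = r.dropWhile PySem.Chars.isalpha := by
  induction w with
  | nil => simp
  | cons d w' ih =>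
    have hd : PySem.Chars.isalpha d = true := h d (by simp)
    have ih' := ih (fun c hc => h c (by simp [hc]))
    simp [hd, ih'.1, ih'.2]

theorem spinRuns_all_alpha {w : List Char} (h : ∀ c ∈ w, PySem.Chars.isalpha c = true) :
    spinRuns w = spinW w := by
  cases w with
  | nil => simp [spinRuns, spinParts, spinW]
  | cons d w' =>
    have hd : PySem.Chars.isalpha d = true := h d (by simp)
    have hw' : ∀ c ∈ w', PySem.Chars.isalpha c = true := fun c hc => h c (by simp [hc])
    have h1 := (takeWhile_append_all (r := ([] : List Char)) h)
    have h2 := (takeWhile_append_all (r := ([] : List Char)) hw')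
    simp only [List.append_nil, List.takeWhile_nil, List.dropWhile_nil] at h1 h2
    unfold spinRuns
    rw [spinParts, if_pos hd]
    simp only [h1.1, h2.2, List.flatten_cons]
    rw [spinParts]
    simp [spinW]

theorem spinRuns_word_append {w : List Char} (h : ∀ c ∈ w, PySem.Chars.isalpha c = true)
    {c : Char} (hc : PySem.Chars.isalpha c = false) (cs : List Char) :
    spinRuns (w ++ c :: cs) = spinW w ++ ' ' :: spinRuns cs := by
  cases w with
  | nil => simp [spinRuns, spinParts, hc, spinW]
  | cons d w' =>
    have hd : PySem.Chars.isalpha d = true := h d (by simp)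
    have hw' : ∀ x ∈ w', PySem.Chars.isalpha x = true := fun x hx => h x (by simp [hx])
    have h1 := takeWhile_append_all (r := c :: cs) h
    have h2 := takeWhile_append_all (r := c :: cs) hw'
    unfold spinRuns
    rw [List.cons_append, spinParts, if_pos hd]
    simp only [← List.cons_append, h1.1, h2.2]
    simp [hc, spinParts, spinW]

-- A's loop computes ret ++ spinRuns (word ++ cs)
theorem a_inv (cs : List Char) : ∀ (ret word : List Char),
    (∀ c ∈ word, PySem.Chars.isalpha c = true) →
    (let st := cs.foldl
      (fun (p : List Char × List Char) c =>
        if PySem.Chars.isalpha c then (p.1, p.2 ++ [c])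
        else if 5 ≤ p.2.length then (p.1 ++ p.2.reverse ++ [' '], ([] : List Char))
        else (p.1 ++ p.2 ++ [' '], ([] : List Char))) (ret, word)
     (if 5 ≤ st.2.length then st.1 ++ st.2.reverse else st.1 ++ st.2)) = ret ++ spinRuns (word ++ cs) := by
  induction cs with
  | nil =>
    intro ret word h
    simp only [List.foldl_nil, List.append_nil]
    rw [spinRuns_all_alpha h, spinW]
    split_ifs <;> rfl
  | cons c cs' ih =>
    intro ret word h
    by_cases hc : PySem.Chars.isalpha c = true
    · simp only [List.foldl_cons, hc, if_true]
      have := ih ret (word ++ [c]) (by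
        intro x hx
        rcases List.mem_append.mp hx with hx | hx
        · exact h x hx
        · simp at hx; simpa [hx] using hc)
      simpa [List.append_assoc] using this
    · have hc' : PySem.Chars.isalpha c = false := by simpa using hc
      simp only [List.foldl_cons, hc', if_false, Bool.false_eq_true]
      rw [spinRuns_word_append h hc' cs']
      by_cases h5 : 5 ≤ word.length
      · have := ih (ret ++ word.reverse ++ [' ']) [] (by simp)
        simp only [List.nil_append] at this
        rw [if_pos h5, this]
        simp [spinW, h5, List.append_assoc]
      · have := ih (ret ++ word ++ [' ']) [] (by simp)
        simp only [List.nil_append] at this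
        rw [if_neg h5, this]
        simp [spinW, h5, List.append_assoc]

-- ===== VERDICT (by name: the statement is the Claim_ definition above) =====
theorem spin_words_better_spec : Claim_equal_spin_words_better := by
  intro s _
  unfold Spec_spin_words_better spin_words_better spin_words_better_alt
  dsimp only
  have ha := a_inv s.toList [] [] (by simp)
  simp only [List.nil_append] at ha
  rw [ha]
  rfl
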